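-- pv_equiv track=rewrite | github.com/xthebat/iu4-2k21-mlni | ya-flyingbat/sem05/dfs.py | dfs
-- ===== SOURCE A (Python) =====
-- from typing import Dict, Optional, Set
--
-- def dfs(adj: Dict, start: str, dist: int = 0, visited: Optional[Set[str]] = None):
--     visited = visited or set()
--     if start in visited:
--         return
--     visited.add(start)
--     yield start, dist
--     for other_node, other_dist in adj[start].items():
--         yield from dfs(adj, other_node, dist + other_dist, visited)
-- ===== SOURCE B (Python) =====
-- def dfs(adj, start, dist=0, visited=None):
--     # Iterative DFS with an explicit stack instead of recursion; same yield order,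
--     # same accumulated distances, same in-place mutation of a non-empty `visited`.
--     visited = visited or set()
--     stack = [(start, dist)]
--     while stack:
--         node, d = stack.pop()
--         if node in visited:
--             continue
--         visited.add(node)
--         yield node, d
--         for other_node, other_dist in reversed(list(adj[node].items())):
--             stack.append((other_node, d + other_dist))
-- ===== Notes on version B (the rewrite author's own statement) =====
-- stated objective: alternative
-- what changed: The recursive generator (recursion threading a shared visited set, 'yield from' per neighbor) is replaced by an iterative DFS with an explicit stack: pop a node, skip if visited, yield it, push its neighbors in reversed order so pop order matches the recursive pre-order; same visitation order, distances, KeyError behaviour and in-place mutation of visited.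
-- outside the precondition, e.g. on dfs({'a': {'b': 1}, 'b': {'c': 1}}, 'a', 0, {'b'}): A returns [('a', 0)], B returns [('a', 0)]; on dfs({'a': {}, 'x': {'z': 1}}, 'a', 0, None): A returns [('a', 0)], B returns [('a', 0)]
import Mathlib
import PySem

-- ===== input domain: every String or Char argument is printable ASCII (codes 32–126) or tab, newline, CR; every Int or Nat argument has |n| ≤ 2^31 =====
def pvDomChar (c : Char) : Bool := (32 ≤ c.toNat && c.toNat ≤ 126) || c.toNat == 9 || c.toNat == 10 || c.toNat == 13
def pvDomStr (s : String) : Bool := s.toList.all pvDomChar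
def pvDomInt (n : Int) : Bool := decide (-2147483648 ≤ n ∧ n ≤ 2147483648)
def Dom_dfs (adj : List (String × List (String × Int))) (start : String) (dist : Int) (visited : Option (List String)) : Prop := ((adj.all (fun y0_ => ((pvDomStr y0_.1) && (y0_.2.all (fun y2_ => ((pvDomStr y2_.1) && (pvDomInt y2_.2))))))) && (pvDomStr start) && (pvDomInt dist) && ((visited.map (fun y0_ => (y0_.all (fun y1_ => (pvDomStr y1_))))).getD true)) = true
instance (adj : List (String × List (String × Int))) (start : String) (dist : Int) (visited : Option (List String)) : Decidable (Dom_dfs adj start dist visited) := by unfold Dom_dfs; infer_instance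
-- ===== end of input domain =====

-- B replaces A's recursive generator by an iterative DFS with an explicit stack (same order, distances
-- and in-place mutation of `visited`); equivalence is claimed for the RETURN value (the yielded list).


-- ===== PORT A =====
-- Python dict lookup adj[k] on the association list: first match; none = KeyError
def pyLookup {α : Type} (l : List (String × α)) (k : String) : Option α :=
  (l.find? (fun p => p.1 == k)).map (·.2)

-- A's recursive generator; fuel bounds the recursion depth (each productive level adds a fresh
-- key of adj to visited, so adj.length + 1 is always enough); none = KeyError in Python.
def dfsA (adj : List (String × List (String × Int))) :
    Nat → String → Int → List String → Option (List String × List (String × Int))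
  | 0, _, _, _ => none
  | f + 1, start, dist, visited =>
    if start ∈ visited then some (visited, [])
    else
      match pyLookup adj start with
      | none => none  -- adj[start] raises KeyError
      | some nbrs =>
        -- `visited.add(start); yield start, dist; for … : yield from dfs(adj, other, dist+other_dist, visited)`
        nbrs.foldl
          (fun acc p =>
            match acc with
            | none => none
            | some (vis, out) =>
              match dfsA adj f p.1 (dist + p.2) vis with
              | none => none
              | some (vis', out') => some (vis', out ++ out'))
          (some (start :: visited, [(start, dist)]))

def dfs (adj : List (String × List (String × Int))) (start : String) (dist : Int) (visited : Option (List String)) : List (String × Int) :=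
  -- `visited = visited or set()`: both None and an empty set become a fresh empty set
  match dfsA adj (adj.length + 1) start dist (visited.getD []) with
  | some (_, out) => out
  | none => []  -- Python raises KeyError here; such inputs are excluded by Pre_dfs

-- ===== PORT B =====
def pvKeys (adj : List (String × List (String × Int))) : List String := adj.map Prod.fst

-- number of keys of adj not yet visited (termination measure of the stack loop)
def pvNK (adj : List (String × List (String × Int))) (vis : List String) : Nat :=
  ((pvKeys adj).toFinset.filter (fun k => k ∉ vis)).card

theorem pyLookup_mem_keys {α : Type} {l : List (String × α)} {k : String} {v : α}
    (h : pyLookup l k = some v) : k ∈ l.map Prod.fst := by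
  unfold pyLookup at h
  rcases Option.map_eq_some_iff.mp h with ⟨p, hp, hv⟩
  have hm := List.mem_of_find?_eq_some hp
  have hk : p.1 = k := by simpa using List.find?_some hp
  exact hk ▸ List.mem_map_of_mem hm

theorem pvNK_lt (adj : List (String × List (String × Int))) {vis : List String} {node : String}
    (hk : node ∈ pvKeys adj) (hn : node ∉ vis) :
    pvNK adj (node :: vis) < pvNK adj vis := by
  apply Finset.card_lt_card
  constructor
  · intro x hx
    simp only [Finset.mem_filter, List.mem_cons] at hx ⊢
    exact ⟨hx.1, fun h => hx.2 (Or.inr h)⟩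
  · intro hsub
    have : node ∈ (pvKeys adj).toFinset.filter (fun k => k ∉ vis) := by
      simp [List.mem_toFinset.mpr hk, hn]
    have := hsub this
    simp at this

-- Source B's loop: the stack is modeled top-first (Lean list head = Python list end), so
-- `stack.extend(reversed(list(adj[node].items())))` followed by pop-from-the-end is
-- prepending the neighbours in their original order; `yield` appends to out.
def dfsB_go (adj : List (String × List (String × Int))) :
    List (String × Int) → List String → List (String × Int) → Option (List (String × Int))
  | [], _, out => some out
  | (node, d) :: rest, vis, out =>
    if node ∈ vis then dfsB_go adj rest vis out
    else
      match h : pyLookup adj node with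
      | none => none  -- adj[node] raises KeyError
      | some nbrs =>
          dfsB_go adj (nbrs.map (fun p => (p.1, d + p.2)) ++ rest) (node :: vis) (out ++ [(node, d)])
  termination_by stack vis _ => (pvNK adj vis, stack.length)
  decreasing_by
  · exact Prod.Lex.right _ (by simp)
  · exact Prod.Lex.left _ _ (pvNK_lt adj (pyLookup_mem_keys (by assumption)) (by assumption))

def dfs_alt (adj : List (String × List (String × Int))) (start : String) (dist : Int) (visited : Option (List String)) : List (String × Int) :=
  -- `visited = visited or set()`
  (dfsB_go adj [(start, dist)] (visited.getD []) []).getD []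

-- ===== PRECONDITION & SPEC =====
-- Pre_ excludes inputs on which some adjacency value names a neighbour with no adjacency entry and
-- not in the initial visited set: when such a node is reached A raises KeyError (so those inputs must
-- be excluded); a few inputs where every such node is unreachable are excluded with them, because
-- reachability is not a closed-form input condition — on those A returns and B agrees (see cites).
def Pre_dfs (adj : List (String × List (String × Int))) (start : String) (dist : Int) (visited : Option (List String)) : Prop :=
  start ∈ visited.getD [] ∨
    (start ∈ adj.map Prod.fst ∧
      ∀ p ∈ adj, ∀ q ∈ p.2, q.1 ∈ adj.map Prod.fst ∨ q.1 ∈ visited.getD [])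
instance (adj : List (String × List (String × Int))) (start : String) (dist : Int) (visited : Option (List String)) : Decidable (Pre_dfs adj start dist visited) := by unfold Pre_dfs; infer_instance

def pvWitness_dfs : (List (String × List (String × Int))) × String × Int × Option (List String) :=
  ([("a", [("b", 1), ("c", 2)]), ("b", [("a", 5)]), ("c", [])], "a", 0, none)

def Spec_dfs (adj : List (String × List (String × Int))) (start : String) (dist : Int) (visited : Option (List String)) (out : List (String × Int)) : Prop := out = dfs_alt adj start dist visited
instance (adj : List (String × List (String × Int))) (start : String) (dist : Int) (visited : Option (List String)) (out : List (String × Int)) : Decidable (Spec_dfs adj start dist visited out) := by unfold Spec_dfs; infer_instance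

-- ===== CLAIM (what is proved, stated in full; the proofs are below) =====
def Claim_equal_dfs : Prop := ∀ (adj : List (String × List (String × Int))) (start : String) (dist : Int) (visited : Option (List String)), Dom_dfs adj start dist visited → Pre_dfs adj start dist visited → Spec_dfs adj start dist visited (dfs adj start dist visited)

-- ===== LEMMAS AND PROOFS =====

-- run A's recursion over a whole work list, threading visited (reference semantics used by the proofs)
def runA (adj : List (String × List (String × Int))) (f : Nat) :
    List (String × Int) → List String → Option (List String × List (String × Int))
  | [], vis => some (vis, [])
  | (s, d) :: rest, vis =>
    (dfsA adj f s d vis).bind fun r1 =>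
      (runA adj f rest r1.1).map fun r2 => (r2.1, r1.2 ++ r2.2)

theorem dfsA_visited (adj : List (String × List (String × Int))) {f : Nat} (hf : 0 < f)
    {s : String} (d : Int) {vis : List String} (hs : s ∈ vis) :
    dfsA adj f s d vis = some (vis, []) := by
  cases f with
  | zero => omega
  | succ f => simp [dfsA, hs]

theorem foldl_none (adj : List (String × List (String × Int))) (f : Nat) (dist : Int)
    (l : List (String × Int)) :
    l.foldl
      (fun acc p =>
        match acc with
        | none => none
        | some (vis, out) =>
          match dfsA adj f p.1 (dist + p.2) vis with
          | none => none
          | some (vis', out') => some (vis', out ++ out'))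
      none = none := by
  induction l with
  | nil => rfl
  | cons p l ih => simpa using ih

theorem dfsA_eq (adj : List (String × List (String × Int))) (f : Nat) {s : String} (d : Int)
    {vis : List String} (hs : s ∉ vis) {nbrs : List (String × Int)}
    (hl : pyLookup adj s = some nbrs) :
    dfsA adj (f + 1) s d vis =
      (runA adj f (nbrs.map (fun p => (p.1, d + p.2))) (s :: vis)).map
        (fun r => (r.1, (s, d) :: r.2)) := by
  have key : ∀ (l : List (String × Int)) (vis0 : List String) (acc0 : List (String × Int)),
      l.foldl
        (fun acc p =>
          match acc with
          | none => none
          | some (vis, out) =>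
            match dfsA adj f p.1 (d + p.2) vis with
            | none => none
            | some (vis', out') => some (vis', out ++ out'))
        (some (vis0, acc0)) =
      (runA adj f (l.map (fun p => (p.1, d + p.2))) vis0).map (fun r => (r.1, acc0 ++ r.2)) := by
    intro l
    induction l with
    | nil => intro vis0 acc0; simp [runA]
    | cons q l ih =>
      intro vis0 acc0
      simp only [List.foldl_cons, List.map_cons, runA]
      cases h1 : dfsA adj f q.1 (d + q.2) vis0 with
      | none => simpa using foldl_none adj f d l
      | some r1 =>
        obtain ⟨v1, o1⟩ := r1
        rw [ih v1 (acc0 ++ o1)]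
        cases h2 : runA adj f (l.map fun p => (p.1, d + p.2)) v1 with
        | none => simp [h2]
        | some r2 => simp [h2, List.append_assoc]
  simp only [dfsA, if_neg hs, hl]
  rw [key nbrs (s :: vis) [(s, d)]]
  simp

theorem dfsA_err (adj : List (String × List (String × Int))) (f : Nat) {s : String} (d : Int)
    {vis : List String} (hs : s ∉ vis) (hl : pyLookup adj s = none) :
    dfsA adj (f + 1) s d vis = none := by
  simp [dfsA, if_neg hs, hl]

-- fuel monotonicity, lifted to runA
theorem runA_mono_of (adj : List (String × List (String × Int))) (f : Nat)
    (hA : ∀ (s : String) (d : Int) (vis : List String) r,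
      dfsA adj f s d vis = some r → dfsA adj (f + 1) s d vis = some r) :
    ∀ (l : List (String × Int)) (vis : List String) r,
      runA adj f l vis = some r → runA adj (f + 1) l vis = some r := by
  intro l
  induction l with
  | nil => intro vis r h; simpa [runA] using h
  | cons q l ihl =>
    intro vis r h
    obtain ⟨s, d⟩ := q
    simp only [runA] at h ⊢
    cases h1 : dfsA adj f s d vis with
    | none => rw [h1] at h; simp at h
    | some r1 =>
      rw [h1] at h
      rw [hA _ _ _ _ h1]
      simp only [Option.bind_some] at h ⊢
      cases h2 : runA adj f l r1.1 with
      | none => rw [h2] at h; simp at h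
      | some r2 => rw [h2] at h; rw [ihl _ _ h2]; exact h

theorem dfsA_mono (adj : List (String × List (String × Int))) :
    ∀ (f : Nat) (s : String) (d : Int) (vis : List String) r,
      dfsA adj f s d vis = some r → dfsA adj (f + 1) s d vis = some r := by
  intro f
  induction f with
  | zero => intro s d vis r h; simp [dfsA] at h
  | succ f ih =>
    intro s d vis r h
    by_cases hs : s ∈ vis
    · rw [dfsA_visited adj (by omega) d hs] at h ⊢; exact h
    · cases hl : pyLookup adj s with
      | none => rw [dfsA_err adj f d hs hl] at h; exact absurd h (by simp)
      | some nbrs =>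
        rw [dfsA_eq adj f d hs hl] at h
        rw [dfsA_eq adj (f + 1) d hs hl]
        cases h2 : runA adj f (nbrs.map fun p => (p.1, d + p.2)) (s :: vis) with
        | none => rw [h2] at h; simp at h
        | some r2 =>
          rw [h2] at h
          rw [runA_mono_of adj f (fun s d vis r => ih s d vis r) _ _ _ h2]
          exact h

theorem runA_mono_le (adj : List (String × List (String × Int))) {f f' : Nat} (hle : f ≤ f')
    {l : List (String × Int)} {vis : List String} {r : List String × List (String × Int)}
    (h : runA adj f l vis = some r) : runA adj f' l vis = some r := by
  induction f', hle using Nat.le_induction with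
  | base => exact h
  | succ f' _ ih =>
    exact runA_mono_of adj f' (fun s d vis r => dfsA_mono adj f' s d vis r) _ _ _ ih

theorem runA_append (adj : List (String × List (String × Int))) (f : Nat)
    {l1 : List (String × Int)} :
    ∀ {l2 : List (String × Int)} {vis v1 v2 : List String} {o1 o2 : List (String × Int)},
      runA adj f l1 vis = some (v1, o1) → runA adj f l2 v1 = some (v2, o2) →
      runA adj f (l1 ++ l2) vis = some (v2, o1 ++ o2) := by
  induction l1 with
  | nil =>
    intro l2 vis v1 v2 o1 o2 h1 h2
    simp only [runA] at h1
    obtain ⟨h1a, h1b⟩ : vis = v1 ∧ ([] : List (String × Int)) = o1 := by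
      have h := Option.some.inj h1
      exact ⟨congrArg Prod.fst h, congrArg Prod.snd h⟩
    subst h1a; subst h1b
    simpa using h2
  | cons q l ih =>
    intro l2 vis v1 v2 o1 o2 h1 h2
    obtain ⟨s, d⟩ := q
    simp only [runA, List.cons_append] at h1 ⊢
    cases ha : dfsA adj f s d vis with
    | none => rw [ha] at h1; simp at h1
    | some ra =>
      rw [ha] at h1
      simp only [Option.bind_some, Option.map_eq_some_iff] at h1
      obtain ⟨rb, hb, hval⟩ := h1
      obtain ⟨h1a, h1b⟩ : rb.1 = v1 ∧ ra.2 ++ rb.2 = o1 := by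
        have h := Prod.mk.injEq .. ▸ hval
        exact ⟨congrArg Prod.fst hval, congrArg Prod.snd hval⟩
      have h2' : runA adj f l2 rb.1 = some (v2, o2) := by rw [h1a]; exact h2
      simp only [Option.bind_some]
      rw [ih hb h2']
      simp [← h1b, List.append_assoc]

theorem pvNK_anti (adj : List (String × List (String × Int))) {vis vis' : List String}
    (h : vis ⊆ vis') : pvNK adj vis' ≤ pvNK adj vis := by
  apply Finset.card_le_card
  intro x hx
  simp only [Finset.mem_filter] at hx ⊢
  exact ⟨hx.1, fun hv => hx.2 (h hv)⟩

theorem pyLookup_some_pair {α : Type} {l : List (String × α)} {k : String} {v : α}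
    (h : pyLookup l k = some v) : (k, v) ∈ l := by
  unfold pyLookup at h
  rcases Option.map_eq_some_iff.mp h with ⟨p, hp, hv⟩
  have hm := List.mem_of_find?_eq_some hp
  have hk : p.1 = k := by simpa using List.find?_some hp
  have : p = (k, v) := by
    obtain ⟨p1, p2⟩ := p
    simp only at hk hv
    simp [hk, hv]
  exact this ▸ hm

theorem pyLookup_isSome {α : Type} {l : List (String × α)} {k : String}
    (h : k ∈ l.map Prod.fst) : ∃ v, pyLookup l k = some v := by
  unfold pyLookup
  rcases List.mem_map.mp h with ⟨p, hp, hk⟩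
  have : (l.find? (fun p => p.1 == k)).isSome := List.find?_isSome.mpr ⟨p, hp, by simp [hk]⟩
  rcases Option.isSome_iff_exists.mp this with ⟨q, hq⟩
  exact ⟨q.2, by simp [hq]⟩

-- totality of A's recursion under the precondition: the fuel is never exhausted
theorem dfsA_total (adj : List (String × List (String × Int))) (V : List String)
    (HG : ∀ p ∈ adj, ∀ q ∈ p.2, q.1 ∈ adj.map Prod.fst ∨ q.1 ∈ V) :
    ∀ (f : Nat) (s : String) (d : Int) (vis : List String),
      V ⊆ vis → (s ∈ vis ∨ s ∈ adj.map Prod.fst) → pvNK adj vis < f →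
      ∃ vis' out, dfsA adj f s d vis = some (vis', out) ∧ vis ⊆ vis' := by
  intro f
  induction f with
  | zero => intro s d vis _ _ hf; omega
  | succ f ih =>
    intro s d vis hV hs hf
    by_cases hin : s ∈ vis
    · exact ⟨vis, [], dfsA_visited adj (by omega) d hin, List.Subset.refl vis⟩
    · have hsk : s ∈ adj.map Prod.fst := hs.resolve_left hin
      obtain ⟨nbrs, hl⟩ := pyLookup_isSome hsk
      have hnf : pvNK adj (s :: vis) < f := by
        have h1 := pvNK_lt adj hsk hin
        omega
      have hrun : ∀ (l : List (String × Int)) (vis0 : List String),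
          V ⊆ vis0 → (∀ q ∈ l, q.1 ∈ vis0 ∨ q.1 ∈ adj.map Prod.fst) → pvNK adj vis0 < f →
          ∃ vis' out, runA adj f l vis0 = some (vis', out) ∧ vis0 ⊆ vis' := by
        intro l
        induction l with
        | nil => intro vis0 _ _ _; exact ⟨vis0, [], rfl, List.Subset.refl vis0⟩
        | cons q l ihl =>
          intro vis0 hV0 hok hf0
          obtain ⟨v1, o1, h1, hsub1⟩ :=
            ih q.1 q.2 vis0 hV0 (hok q List.mem_cons_self) hf0
          obtain ⟨v2, o2, h2, hsub2⟩ :=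
            ihl v1 (hV0.trans hsub1)
              (fun q' hq' => (hok q' (List.mem_cons_of_mem _ hq')).imp_left (fun h => hsub1 h))
              (lt_of_le_of_lt (pvNK_anti adj hsub1) hf0)
          refine ⟨v2, o1 ++ o2, ?_, hsub1.trans hsub2⟩
          obtain ⟨s', d'⟩ := q
          simp only [runA] at h1 h2 ⊢
          rw [h1]
          simp only [Option.bind_some]
          rw [h2]
          rfl
      have hpair := pyLookup_some_pair hl
      have hok : ∀ q ∈ nbrs.map (fun p => (p.1, d + p.2)), q.1 ∈ (s :: vis) ∨ q.1 ∈ adj.map Prod.fst := by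
        intro q hq
        rcases List.mem_map.mp hq with ⟨p, hp, rfl⟩
        rcases HG (s, nbrs) hpair p hp with h | h
        · exact Or.inr h
        · exact Or.inl (List.mem_cons_of_mem _ (hV h))
      obtain ⟨v1, o1, h1, hsub1⟩ :=
        hrun (nbrs.map (fun p => (p.1, d + p.2))) (s :: vis)
          (fun x hx => List.mem_cons_of_mem _ (hV hx)) hok hnf
      refine ⟨v1, (s, d) :: o1, ?_, ?_⟩
      · rw [dfsA_eq adj f d hin hl, h1]; rfl
      · exact (List.subset_cons_self s vis).trans hsub1

-- the bridge: B's stack loop computes exactly what running A's recursion over the stack yields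
theorem dfsB_sim (adj : List (String × List (String × Int))) (V : List String)
    (HG : ∀ p ∈ adj, ∀ q ∈ p.2, q.1 ∈ adj.map Prod.fst ∨ q.1 ∈ V) :
    ∀ (n : Nat) (stack : List (String × Int)) (vis : List String),
      pvNK adj vis ≤ n → V ⊆ vis → (∀ q ∈ stack, q.1 ∈ vis ∨ q.1 ∈ adj.map Prod.fst) →
      ∀ (f : Nat) (out : List (String × Int)) (vis' : List String) (oA : List (String × Int)),
        pvNK adj vis < f → runA adj f stack vis = some (vis', oA) →
        dfsB_go adj stack vis out = some (out ++ oA) := by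
  intro n
  induction n with
  | zero =>
    intro stack
    induction stack with
    | nil =>
      intro vis _ _ _ f out vis' oA _ hr
      simp only [runA] at hr
      have : ([] : List (String × Int)) = oA := congrArg Prod.snd (Option.some.inj hr)
      subst this
      simp [dfsB_go]
    | cons q rest ihs =>
      intro vis hn hV hok f out vis' oA hf hr
      obtain ⟨node, d⟩ := q
      have hfpos : 0 < f := by omega
      have hin : node ∈ vis := by
        rcases hok (node, d) List.mem_cons_self with h | h
        · exact h
        · by_cases hv : node ∈ vis
          · exact hv
          · exact absurd (pvNK_lt adj h hv) (by omega)
      simp only [runA, dfsA_visited adj hfpos d hin, Option.bind_some] at hr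
      rw [dfsB_go]
      simp only [if_pos hin]
      cases h2 : runA adj f rest vis with
      | none => rw [h2] at hr; simp at hr
      | some r2 =>
        rw [h2] at hr
        simp only [Option.map_some, Option.some.injEq] at hr
        have h2' : runA adj f rest vis = some (vis', oA) := by
          rw [h2, ← hr]
          simp
        exact ihs vis hn hV (fun q hq => hok q (List.mem_cons_of_mem _ hq)) f out _ _ hf h2'
  | succ n ihn =>
    intro stack
    induction stack with
    | nil =>
      intro vis _ _ _ f out vis' oA _ hr
      simp only [runA] at hr
      have : ([] : List (String × Int)) = oA := congrArg Prod.snd (Option.some.inj hr)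
      subst this
      simp [dfsB_go]
    | cons q rest ihs =>
      intro vis hn hV hok f out vis' oA hf hr
      obtain ⟨node, d⟩ := q
      have hfpos : 0 < f := by omega
      by_cases hin : node ∈ vis
      · -- already visited: both skip
        simp only [runA, dfsA_visited adj hfpos d hin, Option.bind_some] at hr
        rw [dfsB_go]
        simp only [if_pos hin]
        cases h2 : runA adj f rest vis with
        | none => rw [h2] at hr; simp at hr
        | some r2 =>
          rw [h2] at hr
          simp only [Option.map_some, Option.some.injEq] at hr
          have h2' : runA adj f rest vis = some (vis', oA) := by
            rw [h2, ← hr]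
            simp
          exact ihs vis hn hV (fun q hq => hok q (List.mem_cons_of_mem _ hq)) f out _ _ hf h2'
      · -- expand
        have hk : node ∈ adj.map Prod.fst := (hok (node, d) List.mem_cons_self).resolve_left hin
        obtain ⟨nbrs, hl⟩ := pyLookup_isSome hk
        simp only [runA] at hr
        cases ha : dfsA adj f node d vis with
        | none => rw [ha] at hr; simp at hr
        | some r1 =>
          rw [ha] at hr
          simp only [Option.bind_some] at hr
          cases h2 : runA adj f rest r1.1 with
          | none => rw [h2] at hr; simp at hr
          | some r2 =>
            rw [h2] at hr
            simp only [Option.map_some, Option.some.injEq] at hr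
            -- peel one level off dfsA to expose the neighbour run
            obtain ⟨f', rfl⟩ : ∃ f', f = f' + 1 := ⟨f - 1, by omega⟩
            rw [dfsA_eq adj f' d hin hl] at ha
            cases hm : runA adj f' (nbrs.map fun p => (p.1, d + p.2)) (node :: vis) with
            | none => rw [hm] at ha; simp at ha
            | some rm =>
              rw [hm] at ha
              simp only [Option.map_some, Option.some.injEq] at ha
              have hm' : runA adj (f' + 1) (nbrs.map fun p => (p.1, d + p.2)) (node :: vis) =
                  some (rm.1, rm.2) := runA_mono_le adj (Nat.le_succ f') hm
              have hr1 : r1.1 = rm.1 ∧ r1.2 = (node, d) :: rm.2 := by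
                constructor
                · exact (congrArg Prod.fst ha).symm
                · exact (congrArg Prod.snd ha).symm
              have hcomb := runA_append adj (f' + 1) hm' (hr1.1 ▸ h2)
              have hoA : r1.2 ++ r2.2 = oA := congrArg Prod.snd hr
              have hnk1 : pvNK adj (node :: vis) < pvNK adj vis := pvNK_lt adj hk hin
              have hpair := pyLookup_some_pair hl
              have hok' : ∀ q ∈ nbrs.map (fun p => (p.1, d + p.2)) ++ rest,
                  q.1 ∈ (node :: vis) ∨ q.1 ∈ adj.map Prod.fst := by
                intro q hq
                rcases List.mem_append.mp hq with hq | hq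
                · rcases List.mem_map.mp hq with ⟨p, hp, rfl⟩
                  rcases HG (node, nbrs) hpair p hp with h | h
                  · exact Or.inr h
                  · exact Or.inl (List.mem_cons_of_mem _ (hV h))
                · exact ((hok q (List.mem_cons_of_mem _ hq)).imp_left (List.mem_cons_of_mem _))
              have hstep := ihn (nbrs.map (fun p => (p.1, d + p.2)) ++ rest) (node :: vis)
                (by omega) (fun x hx => List.mem_cons_of_mem _ (hV hx)) hok'
                (f' + 1) (out ++ [(node, d)]) r2.1 (rm.2 ++ r2.2) (by omega) hcomb
              rw [dfsB_go]
              simp only [if_neg hin]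
              split
              next heq => rw [heq] at hl; exact absurd hl (by simp)
              next nbrs2 heq =>
                rw [heq] at hl
                obtain rfl : nbrs2 = nbrs := Option.some.inj hl
                rw [hstep]
                simp [← hoA, hr1.2, List.append_assoc]

-- ===== VERDICT (by name: the statement is the Claim_ definition above) =====
theorem dfs_spec : Claim_equal_dfs := by
  intro adj start dist visited _ hpre
  unfold Spec_dfs dfs dfs_alt
  rcases hpre with hin | ⟨hsk, HG⟩
  · -- start already visited: A returns [] immediately; B pops it, skips, stack empty
    rw [dfsA_visited adj (by omega) dist hin]
    rw [dfsB_go]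
    simp [if_pos hin, dfsB_go]
  · have hVsub : visited.getD [] ⊆ visited.getD [] := List.Subset.refl _
    have hfuel : pvNK adj (visited.getD []) < adj.length + 1 := by
      have h1 : pvNK adj (visited.getD []) ≤ ((pvKeys adj).toFinset).card :=
        Finset.card_le_card (Finset.filter_subset _ _)
      have h2 : ((pvKeys adj).toFinset).card ≤ (pvKeys adj).length := List.toFinset_card_le _
      have h3 : (pvKeys adj).length = adj.length := by simp [pvKeys]
      omega
    obtain ⟨v1, o1, h1, _⟩ :=
      dfsA_total adj (visited.getD []) HG (adj.length + 1) start dist (visited.getD [])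
        hVsub (Or.inr hsk) hfuel
    rw [h1]
    have hrun : runA adj (adj.length + 1) [(start, dist)] (visited.getD []) = some (v1, o1) := by
      simp only [runA, h1, Option.bind_some]
      simp
    have hsim := dfsB_sim adj (visited.getD []) HG (pvNK adj (visited.getD []))
      [(start, dist)] (visited.getD []) (Nat.le_refl _) hVsub
      (fun q hq => by
        have hq' : q = (start, dist) := by simpa using hq
        rw [hq']
        exact Or.inr hsk)
      (adj.length + 1) [] v1 o1 hfuel hrun
    rw [hsim]
    simp
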